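-- pv_equiv track=rewrite | github.com/anonymousAFE8/OFFERS | dataset/SASRec/python/main.py | count_sequences_occurrences
-- ===== SOURCE A (Python) =====
-- def count_sequences_occurrences(seq_key, user_train):
--     """Count how many times seq_key appears in the user_train dataset."""
--     count = 0
--     seq_len = len(seq_key)
--     for user, items in user_train.items():
--         for i in range(len(items) - seq_len + 1):
--             if tuple(items[i:i + seq_len]) == seq_key:
--                 count += 1
--     return count
-- ===== SOURCE B (Python) =====
-- def count_sequences_occurrences(seq_key, user_train):
--     """Rolling-hash (Rabin-Karp) scan: O(1) hash update per position, with
--     direct comparison only on hash hits, instead of an O(m) slice comparison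
--     at every position."""
--     m = len(seq_key)
--     MOD = 1000000007
--     BASE = 131
--     if m == 0:
--         total = 0
--         for items in user_train.values():
--             total += len(items) + 1
--         return total
--     target = 0
--     for x in seq_key:
--         target = (target * BASE + x) % MOD
--     power = pow(BASE, m - 1, MOD)
--     total = 0
--     for items in user_train.values():
--         n = len(items)
--         if n < m:
--             continue
--         h = 0
--         for x in items[:m]:
--             h = (h * BASE + x) % MOD
--         for i in range(n - m + 1):
--             if h == target and tuple(items[i:i + m]) == seq_key:
--                 total += 1
--             if i + m < n:
--                 h = ((h - items[i] * power) * BASE + items[i + m]) % MOD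
--     return total
-- ===== Notes on version B (the rewrite author's own statement) =====
-- stated objective: alternative
-- what changed: Replaces A's per-position slice-and-compare scan with a Rabin-Karp rolling hash: each user's list is scanned once with a constant-size hash update per position and the window is compared to the pattern only on a hash hit.
import Mathlib
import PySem

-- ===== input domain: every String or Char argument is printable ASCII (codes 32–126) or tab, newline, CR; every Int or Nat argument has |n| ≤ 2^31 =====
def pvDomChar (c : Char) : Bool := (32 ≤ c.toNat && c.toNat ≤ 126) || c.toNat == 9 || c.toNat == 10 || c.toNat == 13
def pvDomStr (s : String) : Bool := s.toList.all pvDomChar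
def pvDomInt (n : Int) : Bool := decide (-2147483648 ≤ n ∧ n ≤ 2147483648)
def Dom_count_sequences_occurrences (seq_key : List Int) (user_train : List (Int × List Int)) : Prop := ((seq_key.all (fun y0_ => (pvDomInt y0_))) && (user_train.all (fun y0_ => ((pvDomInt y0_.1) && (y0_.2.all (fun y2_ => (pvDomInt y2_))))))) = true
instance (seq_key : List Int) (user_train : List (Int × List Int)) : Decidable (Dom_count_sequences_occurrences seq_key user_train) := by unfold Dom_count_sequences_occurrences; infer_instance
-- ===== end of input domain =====

-- B replaces A's per-position slice comparison with a Rabin–Karp rolling hash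
-- (constant-size hash update per position, slice compared only on hash hits); objective: alternative.

-- ===== PORT A =====
-- loop body of A's inner 'for i in range(len(items) - seq_len + 1)'
def pvStepA (seq_key : List Int) (items : List Int) (seq_len : Int) (c : Int) (i : Int) : Int :=
  if PySem.List.slice items (some i) (some (i + seq_len)) = seq_key then c + 1 else c

def count_sequences_occurrences (seq_key : List Int) (user_train : List (Int × List Int)) : Int :=
  let seq_len : Int := (seq_key.length : Int)
  user_train.foldl (fun count ui =>
    (PySem.List.pyRange 0 ((ui.2.length : Int) - seq_len + 1) 1).foldl
      (pvStepA seq_key ui.2 seq_len) count) 0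

-- ===== PORT B =====
-- loop body of B's inner 'for i in range(n - m + 1)': state st = (h, total)
def pvStepB (seq_key : List Int) (items : List Int) (target power : Int) (st : Int × Int) (i : Int) : Int × Int :=
  let t := if st.1 = target ∧ PySem.List.slice items (some i) (some (i + (seq_key.length : Int))) = seq_key
           then st.2 + 1 else st.2
  let h := if i + (seq_key.length : Int) < (items.length : Int)
           then PySem.Int.mod ((st.1 - (PySem.List.pyGetD items i 0) * power) * 131
                + PySem.List.pyGetD items (i + (seq_key.length : Int)) 0) 1000000007
           else st.1
  (h, t)

def count_sequences_occurrences_alt (seq_key : List Int) (user_train : List (Int × List Int)) : Int :=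
  let m := seq_key.length
  if m = 0 then
    user_train.foldl (fun total ui => total + ((ui.2.length : Int) + 1)) 0
  else
    let target := seq_key.foldl (fun t x => PySem.Int.mod (t * 131 + x) 1000000007) 0
    let power := PySem.Int.powMod 131 (m - 1) 1000000007
    user_train.foldl (fun total ui =>
      let n := ui.2.length
      if n < m then total
      else
        let h0 := (PySem.List.slice ui.2 none (some (m : Int))).foldl
            (fun h x => PySem.Int.mod (h * 131 + x) 1000000007) 0
        ((PySem.List.pyRange 0 ((n : Int) - (m : Int) + 1) 1).foldl
          (pvStepB seq_key ui.2 target power) (h0, total)).2) 0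

-- ===== PRECONDITION & SPEC =====
def Spec_count_sequences_occurrences (seq_key : List Int) (user_train : List (Int × List Int)) (out : Int) : Prop := out = count_sequences_occurrences_alt seq_key user_train
instance (seq_key : List Int) (user_train : List (Int × List Int)) (out : Int) : Decidable (Spec_count_sequences_occurrences seq_key user_train out) := by unfold Spec_count_sequences_occurrences; infer_instance

-- ===== CLAIM (what is proved, stated in full; the proofs are below) =====
def Claim_equal_count_sequences_occurrences : Prop := ∀ (seq_key : List Int) (user_train : List (Int × List Int)), Dom_count_sequences_occurrences seq_key user_train → Spec_count_sequences_occurrences seq_key user_train (count_sequences_occurrences seq_key user_train)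

-- ===== LEMMAS AND PROOFS =====

-- Horner evaluation without the modulus: the proof-side value of the rolling hash
def pvV (xs : List Int) (a : Int) : Int := xs.foldl (fun h x => h * 131 + x) a

lemma pvModM (z : Int) : PySem.Int.mod z 1000000007 = z % 1000000007 :=
  PySem.Int.mod_eq_emod_of_pos (by norm_num)

lemma pvV_congr_mod (xs : List Int) : ∀ a b : Int, a % 1000000007 = b % 1000000007 →
    pvV xs a % 1000000007 = pvV xs b % 1000000007 := by
  induction xs with
  | nil => intro a b h; exact h
  | cons x xs ih =>
    intro a b h
    exact ih _ _ ((Int.ModEq.mul_right 131 h).add_right x)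

-- B's hash loops compute the Horner value mod 1000000007
lemma pvFoldMod_eq (xs : List Int) : ∀ a : Int, a % 1000000007 = a →
    xs.foldl (fun h x => PySem.Int.mod (h * 131 + x) 1000000007) a = pvV xs a % 1000000007 := by
  induction xs with
  | nil => intro a h; exact h.symm
  | cons x xs ih =>
    intro a h
    show xs.foldl _ (PySem.Int.mod (a * 131 + x) 1000000007) = _
    rw [pvModM, ih _ (Int.emod_emod_of_dvd _ dvd_rfl)]
    exact pvV_congr_mod xs _ _ (Int.emod_emod_of_dvd _ dvd_rfl)

lemma pvV_shift (xs : List Int) : ∀ a : Int, pvV xs a = a * 131 ^ xs.length + pvV xs 0 := by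
  induction xs with
  | nil => intro a; simp [pvV]
  | cons x xs ih =>
    intro a
    show pvV xs (a * 131 + x) = a * 131 ^ (xs.length + 1) + pvV xs (0 * 131 + x)
    rw [ih (a * 131 + x), ih (0 * 131 + x)]
    ring

lemma pvV_append_singleton (w : List Int) (y : Int) : pvV (w ++ [y]) 0 = pvV w 0 * 131 + y := by
  simp [pvV, List.foldl_append]

-- the rolling-hash window update, without the modulus
lemma pv_window_step (xs : List Int) (i m : Nat) (hm : 1 ≤ m) (hb : i + m < xs.length) :
    pvV ((xs.drop (i+1)).take m) 0
      = (pvV ((xs.drop i).take m) 0 - xs[i]'(by omega) * 131 ^ (m-1)) * 131 + xs[i+m]'hb := by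
  obtain ⟨m', rfl⟩ : ∃ m', m = m' + 1 := ⟨m - 1, by omega⟩
  have hdi : xs.drop i = xs[i]'(by omega) :: xs.drop (i+1) := List.drop_eq_getElem_cons (by omega)
  have h2 : (xs.drop (i+1))[m']? = some (xs[i+(m'+1)]'hb) := by
    rw [List.getElem?_drop]
    rw [List.getElem?_eq_getElem (by omega)]
    congr 1
    congr 1
    omega
  have h3 : (xs.drop (i+1)).take (m'+1) = (xs.drop (i+1)).take m' ++ [xs[i+(m'+1)]'hb] := by
    rw [List.take_add_one, h2]; rfl
  have h4 : (xs.drop i).take (m'+1) = xs[i]'(by omega) :: (xs.drop (i+1)).take m' := by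
    rw [hdi]; rfl
  have hlen : ((xs.drop (i+1)).take m').length = m' := by
    rw [List.length_take, List.length_drop]; omega
  rw [h3, h4, pvV_append_singleton]
  show _ = (pvV ((xs.drop (i+1)).take m') (0 * 131 + xs[i]'(by omega)) - _) * 131 + _
  rw [pvV_shift ((xs.drop (i+1)).take m') (0 * 131 + xs[i]'(by omega)), hlen]
  simp only [Nat.add_sub_cancel]
  ring

-- main inner-loop invariant: B's scan counts exactly the positions A counts
lemma pv_inner (key items : List Int) (target power : Int) (hm : 1 ≤ key.length)
    (htarget : target = pvV key 0 % 1000000007)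
    (hpow : power % 1000000007 = 131 ^ (key.length - 1) % 1000000007) :
    ∀ (fuel j : Nat) (h total : Int),
      ((items.length : Int) - (key.length : Int) + 1 - (j : Int)).toNat ≤ fuel →
      h = pvV ((items.drop j).take key.length) 0 % 1000000007 →
      ((PySem.List.pyRange (j : Int) ((items.length : Int) - (key.length : Int) + 1) 1).foldl
          (pvStepB key items target power) (h, total)).2
        = (PySem.List.pyRange (j : Int) ((items.length : Int) - (key.length : Int) + 1) 1).foldl
            (pvStepA key items (key.length : Int)) total := by
  intro fuel
  induction fuel with
  | zero =>
    intro j h total hfuel hinv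
    rw [PySem.List.pyRange_one_eq_nil (by omega)]
    rfl
  | succ f ih =>
    intro j h total hfuel hinv
    by_cases hje : (j : Int) < (items.length : Int) - (key.length : Int) + 1
    · rw [PySem.List.pyRange_one_cons hje]
      simp only [List.foldl_cons]
      have hjlt : j + key.length ≤ items.length := by omega
      have hslice : PySem.List.slice items (some (j : Int)) (some ((j : Int) + (key.length : Int)))
          = (items.drop j).take key.length := PySem.List.slice_natCast_add items j key.length
      have hcondB : (h = target ∧ PySem.List.slice items (some (j : Int)) (some ((j : Int) + (key.length : Int))) = key)
          ↔ PySem.List.slice items (some (j : Int)) (some ((j : Int) + (key.length : Int))) = key := by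
        constructor
        · exact And.right
        · intro hc
          refine ⟨?_, hc⟩
          rw [hinv, htarget, ← hslice, hc]
      have hstB : pvStepB key items target power (h, total) (j : Int)
          = ((if (j : Int) + (key.length : Int) < (items.length : Int)
              then PySem.Int.mod ((h - (PySem.List.pyGetD items (j : Int) 0) * power) * 131
                   + PySem.List.pyGetD items ((j : Int) + (key.length : Int)) 0) 1000000007
              else h),
             (if PySem.List.slice items (some (j : Int)) (some ((j : Int) + (key.length : Int))) = key then total + 1 else total)) := by
        simp only [pvStepB]
        congr 1
        by_cases hc : PySem.List.slice items (some (j : Int)) (some ((j : Int) + (key.length : Int))) = key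
        · rw [if_pos (hcondB.mpr hc), if_pos hc]
        · rw [if_neg (fun hand => hc (hcondB.mp hand)), if_neg hc]
      have hstA : pvStepA key items (key.length : Int) total (j : Int)
          = (if PySem.List.slice items (some (j : Int)) (some ((j : Int) + (key.length : Int))) = key then total + 1 else total) := rfl
      rw [hstB, hstA]
      by_cases hb : (j : Int) + (key.length : Int) < (items.length : Int)
      · have hbn : j + key.length < items.length := by exact_mod_cast (by push_cast; omega : ((j + key.length : Nat) : Int) < (items.length : Int))
        rw [if_pos hb]
        have hg1 : PySem.List.pyGetD items (j : Int) 0 = items[j]'(by omega) := by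
          rw [PySem.List.pyGetD_natCast]
          exact List.getD_eq_getElem _ _ (by omega)
        have hg2 : PySem.List.pyGetD items ((j : Int) + (key.length : Int)) 0 = items[j + key.length]'hbn := by
          have : (j : Int) + (key.length : Int) = ((j + key.length : Nat) : Int) := by push_cast; ring
          rw [this, PySem.List.pyGetD_natCast]
          exact List.getD_eq_getElem _ _ (by omega)
        have hh : h % 1000000007 = pvV ((items.drop j).take key.length) 0 % 1000000007 := by
          rw [hinv]; exact Int.emod_emod_of_dvd _ dvd_rfl
        have hstep := pv_window_step items j key.length hm hbn
        have hinv' : PySem.Int.mod ((h - (PySem.List.pyGetD items (j : Int) 0) * power) * 131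
              + PySem.List.pyGetD items ((j : Int) + (key.length : Int)) 0) 1000000007
            = pvV ((items.drop (j+1)).take key.length) 0 % 1000000007 := by
          rw [pvModM, hg1, hg2, hstep]
          exact (((Int.ModEq.sub hh (Int.ModEq.mul_left _ hpow)).mul_right 131).add_right _)
        rw [hinv']
        have hcast : (j : Int) + 1 = ((j + 1 : Nat) : Int) := by push_cast; ring
        rw [hcast]
        exact ih (j + 1) _ _ (by omega) rfl
      · rw [if_neg hb]
        have hnil : PySem.List.pyRange ((j : Int) + 1) ((items.length : Int) - (key.length : Int) + 1) 1 = [] :=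
          PySem.List.pyRange_one_eq_nil (by omega)
        rw [hnil]
        rfl
    · rw [PySem.List.pyRange_one_eq_nil (by omega)]
      rfl

-- ===== VERDICT (by name: the statement is the Claim_ definition above) =====
theorem count_sequences_occurrences_spec : Claim_equal_count_sequences_occurrences := by
  unfold Claim_equal_count_sequences_occurrences
  intro key ut _
  unfold Spec_count_sequences_occurrences count_sequences_occurrences count_sequences_occurrences_alt
  by_cases hk : key.length = 0
  · have hkey : key = [] := List.length_eq_zero_iff.mp hk
    subst hkey
    dsimp only
    simp only [List.length_nil, Nat.cast_zero, reduceIte]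
    apply PySem.List.foldl_congr_mem
    intro acc ui _
    have hbody : ∀ (c i : Int), i ∈ PySem.List.pyRange 0 ((ui.2.length : Int) - 0 + 1) 1 →
        pvStepA [] ui.2 0 c i = c + 1 := by
      intro c i hi
      have h0i : 0 ≤ i := (PySem.List.mem_pyRange_one.mp hi).1
      unfold pvStepA
      rw [if_pos]
      rw [add_zero, PySem.List.slice_toNat ui.2 h0i h0i]
      simp
    rw [PySem.List.foldl_congr_mem _ (pvStepA [] ui.2 0) (fun (c : Int) (_ : Int) => c + 1) acc hbody]
    rw [PySem.List.foldl_add _ (fun _ => (1 : Int)) acc]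
    rw [PySem.List.sum_map_const_int, PySem.List.length_pyRange_one]
    omega
  · have hm : 1 ≤ key.length := by omega
    rw [if_neg hk]
    apply PySem.List.foldl_congr_mem
    intro acc ui _
    by_cases hlt : ui.2.length < key.length
    · rw [if_pos hlt]
      rw [PySem.List.pyRange_one_eq_nil (by omega)]
      rfl
    · rw [if_neg hlt]
      have htarget : key.foldl (fun t x => PySem.Int.mod (t * 131 + x) 1000000007) 0
          = pvV key 0 % 1000000007 := pvFoldMod_eq key 0 (by norm_num)
      have hpow : PySem.Int.powMod 131 (key.length - 1) 1000000007 % 1000000007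
          = 131 ^ (key.length - 1) % 1000000007 := by
        rw [PySem.Int.powMod_eq_emod 131 _ (by norm_num)]
        exact Int.emod_emod_of_dvd _ dvd_rfl
      have h0 : (PySem.List.slice ui.2 none (some ((key.length : Nat) : Int))).foldl
            (fun h x => PySem.Int.mod (h * 131 + x) 1000000007) 0
          = pvV ((ui.2.drop 0).take key.length) 0 % 1000000007 := by
        rw [PySem.List.slice_to_natCast, List.drop_zero]
        exact pvFoldMod_eq _ 0 (by norm_num)
      have := pv_inner key ui.2 _ _ hm htarget hpow
        (((ui.2.length : Int) - (key.length : Int) + 1 - ((0 : Nat) : Int)).toNat) 0 _ acc le_rfl h0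
      simpa using this.symm
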